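-- pv_equiv track=rewrite | github.com/yossy6028/social-exam-analyzer | modules/improved_question_extractor.py | _select_questions_by_target
-- ===== SOURCE A (Python) =====
-- def _select_questions_by_target(scored_lines: list, lines: list) -> dict:
--     """期待値9問に基づいて問題を選択"""
--     selected_questions = {
--         '大問1': [],
--         '大問2': [],
--         '大問3': []
--     }
--
--     # 大問1（行0-99）から上位3問を選択
--     major1_questions = [item for item in scored_lines if item['line_num'] < 100]
--     selected_questions['大問1'] = major1_questions[:3]
--
--     # 大問2（行100-199）から上位3問を選択
--     major2_questions = [item for item in scored_lines if 100 <= item['line_num'] < 200]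
--     selected_questions['大問2'] = major2_questions[:2]  # 2問のみ選択
--
--     # 大問3（行200-299）から上位4問を選択
--     major3_questions = [item for item in scored_lines if 200 <= item['line_num'] < 300]
--     selected_questions['大問3'] = major3_questions[:4]  # 4問選択
--
--     return selected_questions
-- ===== SOURCE B (Python) =====
-- def _select_questions_by_target(scored_lines: list, lines: list) -> dict:
--     selected_questions = {'大問1': [], '大問2': [], '大問3': []}
--     for item in scored_lines:
--         n = item['line_num']
--         if n < 100:
--             selected_questions['大問1'].append(item)
--         elif n < 200:
--             selected_questions['大問2'].append(item)
--         elif n < 300: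
--             selected_questions['大問3'].append(item)
--     selected_questions['大問1'] = selected_questions['大問1'][:3]
--     selected_questions['大問2'] = selected_questions['大問2'][:2]
--     selected_questions['大問3'] = selected_questions['大問3'][:4]
--     return selected_questions
-- ===== Notes on version B (the rewrite author's own statement) =====
-- stated objective: simpler
-- what changed: One dispatching pass over scored_lines that appends each item into its bucket (with prefix limits applied afterwards) replaces three separate full-list filtered comprehensions.
import Mathlib
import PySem

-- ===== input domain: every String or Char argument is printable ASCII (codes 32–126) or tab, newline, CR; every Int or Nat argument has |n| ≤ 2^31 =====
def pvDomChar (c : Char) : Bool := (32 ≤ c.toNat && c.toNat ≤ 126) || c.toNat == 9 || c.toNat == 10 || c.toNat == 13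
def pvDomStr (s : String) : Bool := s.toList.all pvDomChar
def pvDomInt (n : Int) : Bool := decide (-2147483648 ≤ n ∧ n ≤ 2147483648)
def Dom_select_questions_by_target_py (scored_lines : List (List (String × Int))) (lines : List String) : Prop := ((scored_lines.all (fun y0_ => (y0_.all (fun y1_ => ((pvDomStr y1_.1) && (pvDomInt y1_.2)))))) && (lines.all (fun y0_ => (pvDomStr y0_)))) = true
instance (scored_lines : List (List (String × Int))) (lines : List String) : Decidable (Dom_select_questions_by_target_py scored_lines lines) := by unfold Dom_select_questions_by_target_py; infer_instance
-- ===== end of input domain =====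

-- B builds all three buckets in ONE dispatching pass and slices afterwards, instead of A's three full filtered scans (objective: simpler).

-- item['line_num'] : first-match lookup in the association list (KeyError = none, excluded by Pre_)
def pvLineNum (item : List (String × Int)) : Int :=
  (((item.find? (fun p => p.1 == "line_num")).map (·.2)).getD 0)

-- ===== PORT A =====
def select_questions_by_target_py (scored_lines : List (List (String × Int))) (lines : List String) : List (String × List (List (String × Int))) :=
  let major1_questions := scored_lines.filter (fun item => decide (pvLineNum item < 100))
  let major2_questions := scored_lines.filter (fun item => decide (100 ≤ pvLineNum item ∧ pvLineNum item < 200))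
  let major3_questions := scored_lines.filter (fun item => decide (200 ≤ pvLineNum item ∧ pvLineNum item < 300))
  [("大問1", major1_questions.take 3), ("大問2", major2_questions.take 2), ("大問3", major3_questions.take 4)]

-- ===== PORT B =====
-- single pass: fold over scored_lines accumulating the three buckets, then apply the prefix limits
def pvDispatch (acc : List (List (String × Int)) × List (List (String × Int)) × List (List (String × Int)))
    (item : List (String × Int)) :
    List (List (String × Int)) × List (List (String × Int)) × List (List (String × Int)) :=
  let n := pvLineNum item
  if n < 100 then (acc.1 ++ [item], acc.2.1, acc.2.2)
  else if n < 200 then (acc.1, acc.2.1 ++ [item], acc.2.2)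
  else if n < 300 then (acc.1, acc.2.1, acc.2.2 ++ [item])
  else acc

def select_questions_by_target_py_alt (scored_lines : List (List (String × Int))) (lines : List String) : List (String × List (List (String × Int))) :=
  let buckets := scored_lines.foldl pvDispatch ([], [], [])
  [("大問1", buckets.1.take 3), ("大問2", buckets.2.1.take 2), ("大問3", buckets.2.2.take 4)]

-- ===== PRECONDITION & SPEC =====
-- Pre_ excludes exactly the inputs where some item lacks the 'line_num' key, on which Python A raises KeyError.
def Pre_select_questions_by_target_py (scored_lines : List (List (String × Int))) (lines : List String) : Prop :=
  (scored_lines.all (fun item => item.any (fun p => p.1 == "line_num"))) = true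
instance (scored_lines : List (List (String × Int))) (lines : List String) : Decidable (Pre_select_questions_by_target_py scored_lines lines) := by unfold Pre_select_questions_by_target_py; infer_instance

def pvWitness_select_questions_by_target_py : (List (List (String × Int))) × List String :=
  ([[("line_num", 5)], [("line_num", 150)], [("line_num", 250)]], ["x"])

def Spec_select_questions_by_target_py (scored_lines : List (List (String × Int))) (lines : List String) (out : List (String × List (List (String × Int)))) : Prop := out = select_questions_by_target_py_alt scored_lines lines
instance (scored_lines : List (List (String × Int))) (lines : List String) (out : List (String × List (List (String × Int)))) : Decidable (Spec_select_questions_by_target_py scored_lines lines out) := by unfold Spec_select_questions_by_target_py; infer_instance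

-- ===== CLAIM (what is proved, stated in full; the proofs are below) =====
def Claim_equal_select_questions_by_target_py : Prop := ∀ (scored_lines : List (List (String × Int))) (lines : List String), Dom_select_questions_by_target_py scored_lines lines → Pre_select_questions_by_target_py scored_lines lines → Spec_select_questions_by_target_py scored_lines lines (select_questions_by_target_py scored_lines lines)

-- ===== LEMMAS AND PROOFS =====
-- invariant of the single dispatch pass: it appends exactly the three filters to the start state
theorem pvDispatch_foldl (sl : List (List (String × Int)))
    (b1 b2 b3 : List (List (String × Int))) :
    sl.foldl pvDispatch (b1, b2, b3) =
      (b1 ++ sl.filter (fun item => decide (pvLineNum item < 100)),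
       b2 ++ sl.filter (fun item => decide (100 ≤ pvLineNum item ∧ pvLineNum item < 200)),
       b3 ++ sl.filter (fun item => decide (200 ≤ pvLineNum item ∧ pvLineNum item < 300))) := by
  induction sl generalizing b1 b2 b3 with
  | nil => simp
  | cons x xs ih =>
    simp only [List.foldl_cons, List.filter_cons, pvDispatch]
    rcases lt_or_ge (pvLineNum x) 100 with h1 | h1
    · have h2 : ¬ (100 ≤ pvLineNum x) := by omega
      have h3 : ¬ (200 ≤ pvLineNum x) := by omega
      simp [h1, h2, h3, ih]
    · rcases lt_or_ge (pvLineNum x) 200 with h2 | h2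
      · have h3 : ¬ (200 ≤ pvLineNum x) := by omega
        simp [not_lt.mpr h1, h1, h2, h3, ih]
      · rcases lt_or_ge (pvLineNum x) 300 with h3 | h3
        · have h4 : (100:Int) ≤ pvLineNum x := by omega
          simp [not_lt.mpr h1, not_lt.mpr h2, h2, h3, h4, ih]
        · have h4 : ¬ (pvLineNum x < 200) := by omega
          simp [not_lt.mpr h1, h4, not_lt.mpr h3, ih]

-- ===== VERDICT (by name: the statement is the Claim_ definition above) =====
theorem select_questions_by_target_py_spec : Claim_equal_select_questions_by_target_py := by
  intro scored_lines lines _ _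
  unfold Spec_select_questions_by_target_py select_questions_by_target_py select_questions_by_target_py_alt
  rw [pvDispatch_foldl]
  simp
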